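-- pv_equiv track=rewrite | github.com/miliar/Code_Jam_Webscraper | solutions_python/Problem_168/64.py | solve
-- ===== SOURCE A (Python) =====
-- def solve(grid):
--   R = len(grid)
--   C = len(grid[0])
--   rows = [[] for _ in range(R)]
--   cols = [[] for _ in range(C)]
--   for i in range(R):
--     for j in range(C):
--       if grid[i][j] != '.':
--         rows[i].append(j)
--         cols[j].append(i)
--
--   result = 0
--
--   for i in range(R):
--     for j in range(C):
--       if grid[i][j] != '.':
--         if len(rows[i]) == 1 and len(cols[j]) == 1: return 'IMPOSSIBLE'
--         if grid[i][j] == '^':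
--           if cols[j][0] == i: result += 1
--         elif grid[i][j] == 'v':
--           if cols[j][-1] == i: result += 1
--         elif grid[i][j] == '<':
--           if rows[i][0] == j: result += 1
--         else:
--           if rows[i][-1] == j: result += 1
--   return '{0}'.format(result)
-- ===== SOURCE B (Python) =====
-- def solve(grid):
--     R = len(grid)
--     C = len(grid[0])
--     # one aggregate (first, last, count) per row and per column instead of full cell lists
--     rinfo = []
--     for i in range(R):
--         first = last = None
--         cnt = 0
--         for j in range(C):
--             if grid[i][j] != '.':
--                 if first is None:
--                     first = j
--                 last = j
--                 cnt += 1
--         rinfo.append((first, last, cnt))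
--     cinfo = []
--     for j in range(C):
--         first = last = None
--         cnt = 0
--         for i in range(R):
--             if grid[i][j] != '.':
--                 if first is None:
--                     first = i
--                 last = i
--                 cnt += 1
--         cinfo.append((first, last, cnt))
--     if any(rinfo[i][2] == 1 and cinfo[rinfo[i][0]][2] == 1 for i in range(R)):
--         return 'IMPOSSIBLE'
--     result = 0
--     for i in range(R):
--         first, last, cnt = rinfo[i]
--         if cnt != 0:
--             if grid[i][first] == '<':
--                 result += 1
--             if grid[i][last] not in ('^', 'v', '<'):
--                 result += 1
--     for j in range(C):
--         first, last, cnt = cinfo[j]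
--         if cnt != 0:
--             if grid[first][j] == '^':
--                 result += 1
--             if grid[last][j] == 'v':
--                 result += 1
--     return str(result)
-- ===== Notes on version B (the rewrite author's own statement) =====
-- stated objective: alternative
-- what changed: B replaces A's per-row/per-column index lists and second full-grid rescan by (first,last,count) aggregates per row and per column, then counts by visiting only the boundary cells of each nonempty row/column.
import Mathlib
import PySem

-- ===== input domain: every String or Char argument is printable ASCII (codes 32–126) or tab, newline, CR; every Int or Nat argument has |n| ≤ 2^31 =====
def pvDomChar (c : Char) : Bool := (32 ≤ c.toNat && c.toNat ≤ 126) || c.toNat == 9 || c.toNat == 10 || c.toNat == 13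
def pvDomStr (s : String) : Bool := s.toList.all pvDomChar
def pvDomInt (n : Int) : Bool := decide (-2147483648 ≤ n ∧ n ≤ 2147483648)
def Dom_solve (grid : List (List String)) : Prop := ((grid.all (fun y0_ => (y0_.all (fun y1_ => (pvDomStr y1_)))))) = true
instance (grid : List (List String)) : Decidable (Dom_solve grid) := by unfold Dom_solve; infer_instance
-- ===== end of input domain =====

-- B computes (first,last,count) aggregates per row/column and counts only boundary cells, instead of
-- A's full per-row/per-column index lists plus a second full-grid scan (objective: alternative).


-- shared indexing helper: Python's grid[i][j] for 0 ≤ i < R, 0 ≤ j < C, ported as getD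
-- (exact on Pre_solve, where the grid is nonempty and every row has length ≥ C).
def cellAt (grid : List (List String)) (i j : Nat) : String := (grid.getD i []).getD j ""

-- ===== PORT A =====
-- first nested loop of A: builds the `rows` and `cols` lists of indices by repeated append
def solveBuild (grid : List (List String)) (R C : Nat) : List (List Nat) × List (List Nat) :=
  (List.range R).foldl (fun rc i =>
    (List.range C).foldl (fun (rc : List (List Nat) × List (List Nat)) j =>
      if cellAt grid i j ≠ "." then
        (rc.1.set i ((rc.1.getD i []) ++ [j]), rc.2.set j ((rc.2.getD j []) ++ [i]))
      else rc) rc)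
    (List.replicate R ([] : List Nat), List.replicate C ([] : List Nat))

-- second nested loop of A; `none` = the early `return 'IMPOSSIBLE'`; xs[-1] on a nonempty list is getLast?
def solveCount (grid : List (List String)) (rows cols : List (List Nat)) (R C : Nat) : Option Int :=
  (List.range R).foldl (fun st i =>
    (List.range C).foldl (fun st j =>
      match st with
      | none => none
      | some result =>
        if cellAt grid i j ≠ "." then
          if (rows.getD i []).length = 1 ∧ (cols.getD j []).length = 1 then none
          else if cellAt grid i j = "^" then
            (if (cols.getD j []).getD 0 0 = i then some (result + 1) else some result)
          else if cellAt grid i j = "v" then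
            (if ((cols.getD j []).getLast?).getD 0 = i then some (result + 1) else some result)
          else if cellAt grid i j = "<" then
            (if (rows.getD i []).getD 0 0 = j then some (result + 1) else some result)
          else
            (if ((rows.getD i []).getLast?).getD 0 = j then some (result + 1) else some result)
        else some result) st) (some 0)

def solve (grid : List (List String)) : String :=
  let R := grid.length
  let C := (grid.getD 0 []).length
  let rc := solveBuild grid R C
  match solveCount grid rc.1 rc.2 R C with
  | none => "IMPOSSIBLE"
  | some result => PySem.Int.toStr result

-- ===== PORT B =====
-- B's inner per-line scan: state (first, last, cnt); `first is None` is the `= none` test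
def altLineInfo (c : Nat → String) (n : Nat) : Option Nat × Option Nat × Nat :=
  (List.range n).foldl (fun (s : Option Nat × Option Nat × Nat) x =>
    if c x ≠ "." then ((if s.1 = none then some x else s.1), some x, s.2.2 + 1) else s)
    (none, none, 0)

def solve_alt (grid : List (List String)) : String :=
  let R := grid.length
  let C := (grid.getD 0 []).length
  let rinfo := (List.range R).map (fun i => altLineInfo (fun j => cellAt grid i j) C)
  let cinfo := (List.range C).map (fun j => altLineInfo (fun i => cellAt grid i j) R)
  if (List.range R).any (fun i =>
      decide ((rinfo.getD i (none, none, 0)).2.2 = 1 ∧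
        (cinfo.getD (((rinfo.getD i (none, none, 0)).1).getD 0) (none, none, 0)).2.2 = 1)) then
    "IMPOSSIBLE"
  else
    let t1 : Int :=
      (List.range R).foldl (fun acc i =>
        let s := rinfo.getD i (none, none, 0)
        if s.2.2 ≠ 0 then
          (acc + (if cellAt grid i (s.1.getD 0) = "<" then 1 else 0))
            + (if cellAt grid i ((s.2.1).getD 0) ∉ ["^", "v", "<"] then 1 else 0)
        else acc) 0
    let total : Int :=
      (List.range C).foldl (fun acc j =>
        let s := cinfo.getD j (none, none, 0)
        if s.2.2 ≠ 0 then
          (acc + (if cellAt grid (s.1.getD 0) j = "^" then 1 else 0))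
            + (if cellAt grid ((s.2.1).getD 0) j = "v" then 1 else 0)
        else acc) t1
    PySem.Int.toStr total

-- ===== PRECONDITION & SPEC =====
-- Pre_solve excludes exactly the inputs on which the Python A raises IndexError:
-- the empty grid (grid[0]) and grids with some row shorter than row 0 (grid[i][j], j < C).
def Pre_solve (grid : List (List String)) : Prop :=
  grid ≠ [] ∧ ∀ row ∈ grid, (grid.getD 0 []).length ≤ row.length
instance (grid : List (List String)) : Decidable (Pre_solve grid) := by unfold Pre_solve; infer_instance

def pvWitness_solve : List (List String) := [["^", ">"], [".", "v"]]

def Spec_solve (grid : List (List String)) (out : String) : Prop := out = solve_alt grid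
instance (grid : List (List String)) (out : String) : Decidable (Spec_solve grid out) := by unfold Spec_solve; infer_instance

-- ===== CLAIM (what is proved, stated in full; the proofs are below) =====
def Claim_equal_solve : Prop := ∀ (grid : List (List String)), Dom_solve grid → Pre_solve grid → Spec_solve grid (solve grid)

-- ===== LEMMAS AND PROOFS =====

-- the set of non-'.' column indices of row i (in order), and of row indices of column j
def pvRowF (grid : List (List String)) (C i : Nat) : List Nat :=
  (List.range C).filter (fun j => decide (cellAt grid i j ≠ "."))
def pvColF (grid : List (List String)) (R j : Nat) : List Nat :=
  (List.range R).filter (fun i => decide (cellAt grid i j ≠ "."))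

-- A returns IMPOSSIBLE at cell (i,j) iff
abbrev pvBad (grid : List (List String)) (R C i j : Nat) : Prop :=
  cellAt grid i j ≠ "." ∧ (pvRowF grid C i).length = 1 ∧ (pvColF grid R j).length = 1

-- A's per-cell contribution to the counter
def pvContrib (grid : List (List String)) (R C i j : Nat) : Int :=
  if cellAt grid i j ≠ "." then
    (if cellAt grid i j = "^" then (if (pvColF grid R j).getD 0 0 = i then 1 else 0)
     else if cellAt grid i j = "v" then (if ((pvColF grid R j).getLast?).getD 0 = i then 1 else 0)
     else if cellAt grid i j = "<" then (if (pvRowF grid C i).getD 0 0 = j then 1 else 0)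
     else (if ((pvRowF grid C i).getLast?).getD 0 = j then 1 else 0))
  else 0

def pvRowPart (grid : List (List String)) (C i j : Nat) : Int :=
  if cellAt grid i j ≠ "." then
    (if cellAt grid i j = "^" then 0
     else if cellAt grid i j = "v" then 0
     else if cellAt grid i j = "<" then (if (pvRowF grid C i).getD 0 0 = j then 1 else 0)
     else (if ((pvRowF grid C i).getLast?).getD 0 = j then 1 else 0))
  else 0

def pvColPart (grid : List (List String)) (R i j : Nat) : Int :=
  if cellAt grid i j ≠ "." then
    (if cellAt grid i j = "^" then (if (pvColF grid R j).getD 0 0 = i then 1 else 0)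
     else if cellAt grid i j = "v" then (if ((pvColF grid R j).getLast?).getD 0 = i then 1 else 0)
     else 0)
  else 0

theorem pvContrib_split (grid : List (List String)) (R C i j : Nat) :
    pvContrib grid R C i j = pvRowPart grid C i j + pvColPart grid R i j := by
  unfold pvContrib pvRowPart pvColPart
  split_ifs <;> ring


-- generic fold lemmas --------------------------------------------------------

theorem pvFoldlPair {α β γ : Type} (step : α × β → γ → α × β) (f : α → γ → α) (g : β → γ → β)
    (h : ∀ p x, step p x = (f p.1 x, g p.2 x)) :
    ∀ (l : List γ) (a : α) (b : β), l.foldl step (a, b) = (l.foldl f a, l.foldl g b) := by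
  intro l
  induction l with
  | nil => intro a b; rfl
  | cons x t ih => intro a b; simp only [List.foldl, h]; exact ih _ _

theorem pvGetDSetSelf {α : Type} (l : List α) (i : Nat) (x d : α) (h : i < l.length) :
    (l.set i x).getD i d = x := by
  simp [List.getD, h]

theorem pvGetDSetNe {α : Type} (l : List α) (i k : Nat) (x d : α) (h : k ≠ i) :
    (l.set i x).getD k d = l.getD k d := by
  simp [List.getD, Ne.symm h]

theorem pvSetGetDSelf {α : Type} (l : List α) (i : Nat) (d : α) (h : i < l.length) :
    l.set i (l.getD i d) = l := by
  rw [List.getD_eq_getElem l d h, List.set_getElem_self]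

-- the row-list half of A's building loop: only slot i is touched, it collects the filter
theorem pvRowInner (c : Nat → String) (i : Nat) :
    ∀ (l : List Nat) (rs : List (List Nat)), i < rs.length →
      l.foldl (fun rs j => if c j ≠ "." then rs.set i ((rs.getD i []) ++ [j]) else rs) rs
        = rs.set i ((rs.getD i []) ++ l.filter (fun j => decide (c j ≠ "."))) := by
  intro l
  induction l with
  | nil =>
    intro rs h
    simp only [List.foldl, List.filter_nil, List.append_nil]
    exact (pvSetGetDSelf rs i [] h).symm
  | cons j t ih =>
    intro rs h
    by_cases hc : c j = "."
    · simpa [List.foldl, hc] using ih rs h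
    · have h2 : i < (rs.set i ((rs.getD i []) ++ [j])).length := by simpa using h
      simp only [List.foldl, if_pos (show c j ≠ "." from hc)]
      rw [ih _ h2, List.set_set, pvGetDSetSelf _ _ _ _ h]
      simp [hc]

-- the col-list half of A's building loop, pointwise
theorem pvColInnerLen (c : Nat → String) (i : Nat) :
    ∀ (l : List Nat) (cs : List (List Nat)),
      (l.foldl (fun cs j => if c j ≠ "." then cs.set j ((cs.getD j []) ++ [i]) else cs) cs).length
        = cs.length := by
  intro l
  induction l with
  | nil => intro cs; rfl
  | cons j t ih =>
    intro cs
    by_cases hc : c j = "."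
    · simpa [List.foldl, hc] using ih cs
    · simp only [List.foldl, if_pos (show c j ≠ "." from hc)]
      rw [ih]; simp

theorem pvColInnerGetD (c : Nat → String) (i : Nat) :
    ∀ (l : List Nat), l.Nodup → ∀ (cs : List (List Nat)) (k : Nat), (∀ j ∈ l, j < cs.length) →
      (l.foldl (fun cs j => if c j ≠ "." then cs.set j ((cs.getD j []) ++ [i]) else cs) cs).getD k []
        = cs.getD k [] ++ (if k ∈ l ∧ c k ≠ "." then [i] else []) := by
  intro l
  induction l with
  | nil => intro _ cs k _; simp
  | cons j t ih =>
    intro hnd cs k hlt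
    have hjlt : j < cs.length := hlt j (by simp)
    have hnd' : t.Nodup := (List.nodup_cons.mp hnd).2
    have hjt : j ∉ t := (List.nodup_cons.mp hnd).1
    by_cases hc : c j = "."
    · rw [List.foldl_cons, if_neg (by simp [hc]), ih hnd' cs k (fun x hx => hlt x (by simp [hx]))]
      by_cases hk : k = j
      · subst hk; simp [hc]
      · simp [hk]
    · rw [List.foldl_cons, if_pos (show c j ≠ "." from hc),
        ih hnd' _ k (fun x hx => by simpa using hlt x (by simp [hx]))]
      by_cases hk : k = j
      · subst hk
        rw [pvGetDSetSelf _ _ _ _ hjlt]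
        simp [hjt, hc]
      · rw [pvGetDSetNe _ _ _ _ _ hk]
        by_cases hkt : k ∈ t <;> simp [hk, hkt]


-- A's building loop, characterized ------------------------------------------

theorem pvRowsOuter (grid : List (List String)) (C : Nat) :
    ∀ (l : List Nat), l.Nodup → ∀ (rs : List (List Nat)) (k : Nat), (∀ i ∈ l, i < rs.length) →
      (l.foldl (fun rs i => (List.range C).foldl
          (fun rs j => if cellAt grid i j ≠ "." then rs.set i ((rs.getD i []) ++ [j]) else rs) rs) rs).getD k []
        = rs.getD k [] ++ (if k ∈ l then pvRowF grid C k else []) := by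
  intro l
  induction l with
  | nil => intro _ rs k _; simp
  | cons i t ih =>
    intro hnd rs k hlt
    have hilt : i < rs.length := hlt i (by simp)
    have hit : i ∉ t := (List.nodup_cons.mp hnd).1
    rw [List.foldl_cons, pvRowInner (fun j => cellAt grid i j) i (List.range C) rs hilt,
      ih ((List.nodup_cons.mp hnd).2) _ k (fun x hx => by simpa using hlt x (by simp [hx]))]
    by_cases hk : k = i
    · subst hk
      rw [pvGetDSetSelf _ _ _ _ hilt]
      simp [hit, pvRowF]
    · rw [pvGetDSetNe _ _ _ _ _ hk]
      by_cases hkt : k ∈ t <;> simp [hk, hkt]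

theorem pvColsOuter (grid : List (List String)) (C : Nat) :
    ∀ (l : List Nat) (cs : List (List Nat)) (k : Nat), cs.length = C → k < C →
      (l.foldl (fun cs i => (List.range C).foldl
          (fun cs j => if cellAt grid i j ≠ "." then cs.set j ((cs.getD j []) ++ [i]) else cs) cs) cs).getD k []
        = cs.getD k [] ++ l.filter (fun i => decide (cellAt grid i k ≠ ".")) := by
  intro l
  induction l with
  | nil => intro cs k _ _; simp
  | cons i t ih =>
    intro cs k hlen hk
    rw [List.foldl_cons, ih _ k (by rw [pvColInnerLen]; exact hlen) hk,
      pvColInnerGetD (fun j => cellAt grid i j) i (List.range C) (List.nodup_range) cs k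
        (fun x hx => by rw [hlen]; simpa using hx)]
    by_cases hc : cellAt grid i k = "."
    · simp [hc]
    · simp [hc, hk, List.append_assoc]

theorem pvBuildEq (grid : List (List String)) (R C : Nat) :
    solveBuild grid R C =
      ((List.range R).foldl (fun rs i => (List.range C).foldl
          (fun rs j => if cellAt grid i j ≠ "." then rs.set i ((rs.getD i []) ++ [j]) else rs) rs)
        (List.replicate R ([] : List Nat)),
       (List.range R).foldl (fun cs i => (List.range C).foldl
          (fun cs j => if cellAt grid i j ≠ "." then cs.set j ((cs.getD j []) ++ [i]) else cs) cs)
        (List.replicate C ([] : List Nat))) := by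
  unfold solveBuild
  refine pvFoldlPair _ _ _ ?_ (List.range R) _ _
  intro p i
  have : p = (p.1, p.2) := rfl
  rw [this]
  refine pvFoldlPair _ _ _ ?_ (List.range C) _ _
  intro q j
  by_cases hc : cellAt grid i j = "." <;> simp [hc]

theorem pvBuildRows (grid : List (List String)) (R C i : Nat) (h : i < R) :
    (solveBuild grid R C).1.getD i [] = pvRowF grid C i := by
  rw [pvBuildEq]
  rw [show ((_, _) : List (List Nat) × List (List Nat)).1 = _ from rfl]
  rw [pvRowsOuter grid C (List.range R) (List.nodup_range) _ i
    (fun x hx => by simpa using hx)]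
  simp [h]

theorem pvBuildCols (grid : List (List String)) (R C j : Nat) (h : j < C) :
    (solveBuild grid R C).2.getD j [] = pvColF grid R j := by
  rw [pvBuildEq]
  rw [show ((_, _) : List (List Nat) × List (List Nat)).2 = _ from rfl]
  rw [pvColsOuter grid C (List.range R) _ j (by simp) h]
  simp [pvColF]


-- A's counting loop, characterized ------------------------------------------

theorem pvFoldlNone {σ γ : Type} (f : Option σ → γ → Option σ) (h : ∀ x, f none x = none) :
    ∀ l : List γ, l.foldl f none = none := by
  intro l
  induction l with
  | nil => rfl
  | cons x t ih => rw [List.foldl_cons, h]; exact ih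

theorem pvCountInner (grid : List (List String)) (R C : Nat) (rows cols : List (List Nat)) (i : Nat)
    (hrow : rows.getD i [] = pvRowF grid C i)
    (hcols : ∀ j, j < C → cols.getD j [] = pvColF grid R j) :
    ∀ (l : List Nat), (∀ j ∈ l, j < C) → ∀ (acc : Int),
      l.foldl (fun st j => match st with
        | none => none
        | some result =>
          if cellAt grid i j ≠ "." then
            if (rows.getD i []).length = 1 ∧ (cols.getD j []).length = 1 then none
            else if cellAt grid i j = "^" then
              (if (cols.getD j []).getD 0 0 = i then some (result + 1) else some result)
            else if cellAt grid i j = "v" then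
              (if ((cols.getD j []).getLast?).getD 0 = i then some (result + 1) else some result)
            else if cellAt grid i j = "<" then
              (if (rows.getD i []).getD 0 0 = j then some (result + 1) else some result)
            else
              (if ((rows.getD i []).getLast?).getD 0 = j then some (result + 1) else some result)
          else some result) (some acc)
      = if l.any (fun j => decide (pvBad grid R C i j)) then none
        else some (acc + ((l.map (fun j => pvContrib grid R C i j)).sum)) := by
  intro l
  induction l with
  | nil => intro _ acc; simp
  | cons j t ih =>
    intro hlt acc
    have hj : j < C := hlt j (by simp)
    rw [List.foldl_cons]
    by_cases hbad : pvBad grid R C i j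
    · obtain ⟨h1, h2, h3⟩ := hbad
      show List.foldl _ (if cellAt grid i j ≠ "." then _ else _) t = _
      rw [if_pos h1, hrow, hcols j hj, if_pos ⟨h2, h3⟩,
        pvFoldlNone _ (fun x => rfl) t]
      have : (j :: t).any (fun j => decide (pvBad grid R C i j)) = true := by
        simp only [List.any_cons, Bool.or_eq_true, decide_eq_true_eq]
        exact Or.inl ⟨h1, h2, h3⟩
      rw [if_pos this]
    · have hstep : (if cellAt grid i j ≠ "." then
            if (rows.getD i []).length = 1 ∧ (cols.getD j []).length = 1 then none
            else if cellAt grid i j = "^" then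
              (if (cols.getD j []).getD 0 0 = i then some (acc + 1) else some acc)
            else if cellAt grid i j = "v" then
              (if ((cols.getD j []).getLast?).getD 0 = i then some (acc + 1) else some acc)
            else if cellAt grid i j = "<" then
              (if (rows.getD i []).getD 0 0 = j then some (acc + 1) else some acc)
            else
              (if ((rows.getD i []).getLast?).getD 0 = j then some (acc + 1) else some acc)
          else some acc) = some (acc + pvContrib grid R C i j) := by
        unfold pvContrib
        rw [hrow, hcols j hj]
        by_cases h1 : cellAt grid i j = "."
        · simp [h1]
        · have hlen : ¬ ((pvRowF grid C i).length = 1 ∧ (pvColF grid R j).length = 1) := by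
            intro hc; exact hbad ⟨h1, hc.1, hc.2⟩
          rw [if_pos (show cellAt grid i j ≠ "." from h1), if_pos (show cellAt grid i j ≠ "." from h1),
            if_neg hlen]
          split_ifs <;> simp
      show List.foldl _ (if cellAt grid i j ≠ "." then _ else _) t = _
      rw [hstep, ih (fun x hx => hlt x (by simp [hx])) (acc + pvContrib grid R C i j)]
      have hnb : decide (pvBad grid R C i j) = false := by simp [hbad]
      simp only [List.any_cons, hnb, Bool.false_or, List.map_cons, List.sum_cons]
      by_cases ha : t.any (fun j => decide (pvBad grid R C i j)) = true
      · rw [if_pos ha, if_pos ha]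
      · rw [if_neg ha, if_neg ha]
        congr 1
        ring

theorem pvCountEq (grid : List (List String)) (R C : Nat) (rows cols : List (List Nat))
    (hrows : ∀ i, i < R → rows.getD i [] = pvRowF grid C i)
    (hcols : ∀ j, j < C → cols.getD j [] = pvColF grid R j) :
    solveCount grid rows cols R C =
      if (List.range R).any (fun i => (List.range C).any (fun j => decide (pvBad grid R C i j))) then none
      else some (((List.range R).map
        (fun i => ((List.range C).map (fun j => pvContrib grid R C i j)).sum)).sum) := by
  unfold solveCount
  suffices h : ∀ (l : List Nat), (∀ i ∈ l, i < R) → ∀ (acc : Int),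
      l.foldl (fun st i => (List.range C).foldl (fun st j => match st with
        | none => none
        | some result =>
          if cellAt grid i j ≠ "." then
            if (rows.getD i []).length = 1 ∧ (cols.getD j []).length = 1 then none
            else if cellAt grid i j = "^" then
              (if (cols.getD j []).getD 0 0 = i then some (result + 1) else some result)
            else if cellAt grid i j = "v" then
              (if ((cols.getD j []).getLast?).getD 0 = i then some (result + 1) else some result)
            else if cellAt grid i j = "<" then
              (if (rows.getD i []).getD 0 0 = j then some (result + 1) else some result)
            else
              (if ((rows.getD i []).getLast?).getD 0 = j then some (result + 1) else some result)
          else some result) st) (some acc)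
      = if l.any (fun i => (List.range C).any (fun j => decide (pvBad grid R C i j))) then none
        else some (acc + ((l.map
          (fun i => ((List.range C).map (fun j => pvContrib grid R C i j)).sum)).sum)) by
    rw [h (List.range R) (fun x hx => by simpa using hx) 0]
    split_ifs <;> simp
  intro l
  induction l with
  | nil => intro _ acc; simp
  | cons i t ih =>
    intro hlt acc
    rw [List.foldl_cons,
      pvCountInner grid R C rows cols i (hrows i (hlt i (by simp))) hcols (List.range C)
        (fun x hx => by simpa using hx) acc]
    by_cases hb : (List.range C).any (fun j => decide (pvBad grid R C i j)) = true
    · rw [if_pos hb, pvFoldlNone _ (fun x => pvFoldlNone _ (fun y => rfl) (List.range C)) t,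
        if_pos (show ((i :: t).any fun i => (List.range C).any fun j =>
          decide (pvBad grid R C i j)) = true from by rw [List.any_cons, hb, Bool.true_or])]
    · rw [if_neg hb, ih (fun x hx => hlt x (by simp [hx]))]
      simp only [List.any_cons, List.map_cons, List.sum_cons]
      rw [show ((List.range C).any fun j => decide (pvBad grid R C i j)) = false from by simpa using hb]
      simp only [Bool.false_or]
      split_ifs <;> [rfl; (congr 1; ring)]


-- B's per-line scan, characterized ------------------------------------------

def pvOr (a b : Option Nat) : Option Nat :=
  match a with
  | some x => some x
  | none => b

theorem pvInfoAux (c : Nat → String) :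
    ∀ (l : List Nat) (o1 o2 : Option Nat) (k : Nat),
      l.foldl (fun (s : Option Nat × Option Nat × Nat) x =>
          if c x ≠ "." then ((if s.1 = none then some x else s.1), some x, s.2.2 + 1) else s)
        (o1, o2, k)
      = (pvOr o1 ((l.filter (fun x => decide (c x ≠ "."))).head?),
         pvOr ((l.filter (fun x => decide (c x ≠ "."))).getLast?) o2,
         k + (l.filter (fun x => decide (c x ≠ "."))).length) := by
  intro l
  induction l with
  | nil => intro o1 o2 k; cases o1 <;> simp [pvOr]
  | cons x t ih =>
    intro o1 o2 k
    by_cases hc : c x = "."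
    · rw [List.foldl_cons, if_neg (by simp [hc])]
      rw [ih o1 o2 k]
      simp [hc]
    · rw [List.foldl_cons, if_pos (show c x ≠ "." from hc), ih _ _ _]
      have hfil : (x :: t).filter (fun x => decide (c x ≠ ".")) =
          x :: t.filter (fun x => decide (c x ≠ ".")) := by simp [hc]
      rw [hfil]
      rcases o1 with _ | a <;>
        cases ht : t.filter (fun x => decide (c x ≠ ".")) <;>
          simp [pvOr, ht, List.getLast?_cons_cons] <;>
            exact ⟨by rw [List.getLast?_eq_some_getLast (List.cons_ne_nil _ _)], by omega⟩

theorem pvLineInfo (c : Nat → String) (n : Nat) :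
    altLineInfo c n =
      (((List.range n).filter (fun x => decide (c x ≠ "."))).head?,
       ((List.range n).filter (fun x => decide (c x ≠ "."))).getLast?,
       ((List.range n).filter (fun x => decide (c x ≠ "."))).length) := by
  unfold altLineInfo
  rw [pvInfoAux]
  refine Prod.ext rfl (Prod.ext ?_ (by simp))
  show pvOr _ none = _
  cases h : ((List.range n).filter (fun x => decide (c x ≠ "."))).getLast? <;> rfl

-- small list facts
theorem pvHeadD (l : List Nat) : l.head?.getD 0 = l.getD 0 0 := by cases l <;> rfl

theorem pvHeadMem (l : List Nat) (h : l ≠ []) : l.getD 0 0 ∈ l := by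
  cases l with
  | nil => exact absurd rfl h
  | cons a t => simp [List.getD]

theorem pvLastMem (l : List Nat) (h : l ≠ []) : (l.getLast?).getD 0 ∈ l := by
  rw [List.getLast?_eq_some_getLast h]
  exact List.getLast_mem h

theorem pvMemRowF (grid : List (List String)) (C i j : Nat) :
    j ∈ pvRowF grid C i ↔ j < C ∧ cellAt grid i j ≠ "." := by
  simp [pvRowF, List.mem_filter]

theorem pvMemColF (grid : List (List String)) (R j i : Nat) :
    i ∈ pvColF grid R j ↔ i < R ∧ cellAt grid i j ≠ "." := by
  simp [pvColF, List.mem_filter]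

-- counting lemmas ------------------------------------------------------------

theorem pvSumIte (n a : Nat) (P : Nat → Prop) [DecidablePred P] :
    ((List.range n).map (fun j => if j = a ∧ P j then (1 : Int) else 0)).sum
      = if a < n ∧ P a then 1 else 0 := by
  induction n with
  | zero => simp
  | succ m ih =>
    rw [List.range_succ, List.map_append, List.sum_append, ih]
    by_cases hm : a = m
    · subst hm
      by_cases hp : P a <;> simp [hp, Nat.lt_irrefl] <;> omega
    · have h1 : ¬ (m = a ∧ P m) := fun hc => hm (hc.1.symm)
      simp only [List.map_cons, List.map_nil, List.sum_cons, List.sum_nil, if_neg h1]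
      have : (a < m + 1 ∧ P a) ↔ (a < m ∧ P a) := by
        constructor
        · rintro ⟨h, hp⟩; exact ⟨by omega, hp⟩
        · rintro ⟨h, hp⟩; exact ⟨by omega, hp⟩
      rw [if_congr this rfl rfl]
      omega

theorem pvSumComm (m n : Nat) (h : Nat → Nat → Int) :
    ((List.range m).map (fun i => ((List.range n).map (fun j => h i j)).sum)).sum
      = ((List.range n).map (fun j => ((List.range m).map (fun i => h i j)).sum)).sum := by
  show (∑ i ∈ Finset.range m, ∑ j ∈ Finset.range n, h i j)
      = ∑ j ∈ Finset.range n, ∑ i ∈ Finset.range m, h i j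
  exact Finset.sum_comm

def pvRowTot (grid : List (List String)) (C i : Nat) : Int :=
  if (pvRowF grid C i).length ≠ 0 then
    (if cellAt grid i ((pvRowF grid C i).getD 0 0) = "<" then (1 : Int) else 0)
      + (if cellAt grid i (((pvRowF grid C i).getLast?).getD 0) ∉ (["^", "v", "<"] : List String)
          then (1 : Int) else 0)
  else 0

def pvColTot (grid : List (List String)) (R j : Nat) : Int :=
  if (pvColF grid R j).length ≠ 0 then
    (if cellAt grid ((pvColF grid R j).getD 0 0) j = "^" then (1 : Int) else 0)
      + (if cellAt grid (((pvColF grid R j).getLast?).getD 0) j = "v" then (1 : Int) else 0)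
  else 0

theorem pvRowSum (grid : List (List String)) (C i : Nat) :
    ((List.range C).map (fun j => pvRowPart grid C i j)).sum = pvRowTot grid C i := by
  unfold pvRowTot
  have hsplit : ∀ j, pvRowPart grid C i j =
      (if j = (pvRowF grid C i).getD 0 0 ∧ (cellAt grid i j ≠ "." ∧ cellAt grid i j = "<")
        then (1 : Int) else 0)
      + (if j = ((pvRowF grid C i).getLast?).getD 0 ∧
            (cellAt grid i j ≠ "." ∧ cellAt grid i j ∉ (["^", "v", "<"] : List String))
        then (1 : Int) else 0) := by
    intro j
    unfold pvRowPart
    by_cases h1 : cellAt grid i j = "."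
    · simp [h1]
    · by_cases h2 : cellAt grid i j = "^"
      · simp [h1, h2]
      · by_cases h3 : cellAt grid i j = "v"
        · simp [h1, h2, h3]
        · by_cases h4 : cellAt grid i j = "<"
          · simp [h1, h2, h3, h4, eq_comm]
          · simp [h1, h2, h3, h4, eq_comm]
  simp only [hsplit]
  rw [PySem.List.sum_map_add_int, pvSumIte, pvSumIte]
  by_cases hF : (pvRowF grid C i).length = 0
  · have hnil : pvRowF grid C i = [] := List.length_eq_zero_iff.mp hF
    have h1 : ¬ ((pvRowF grid C i).getD 0 0 < C ∧
        (cellAt grid i ((pvRowF grid C i).getD 0 0) ≠ "." ∧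
          cellAt grid i ((pvRowF grid C i).getD 0 0) = "<")) := by
      rintro ⟨ha, hb, _⟩
      have : (pvRowF grid C i).getD 0 0 ∈ pvRowF grid C i := (pvMemRowF grid C i _).mpr ⟨ha, hb⟩
      rw [hnil] at this; exact absurd this (List.not_mem_nil)
    have h2 : ¬ (((pvRowF grid C i).getLast?).getD 0 < C ∧
        (cellAt grid i (((pvRowF grid C i).getLast?).getD 0) ≠ "." ∧
          cellAt grid i (((pvRowF grid C i).getLast?).getD 0) ∉ (["^", "v", "<"] : List String))) := by
      rintro ⟨ha, hb, _⟩
      have : ((pvRowF grid C i).getLast?).getD 0 ∈ pvRowF grid C i := (pvMemRowF grid C i _).mpr ⟨ha, hb⟩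
      rw [hnil] at this; exact absurd this (List.not_mem_nil)
    rw [if_neg h1, if_neg h2, if_neg (fun hc => hc hF)]
    rfl
  · have hne : pvRowF grid C i ≠ [] := fun hc => hF (by rw [hc]; rfl)
    have hh := (pvMemRowF grid C i _).mp (pvHeadMem _ hne)
    have hl := (pvMemRowF grid C i _).mp (pvLastMem _ hne)
    rw [if_pos hF]
    congr 1
    · by_cases hc : cellAt grid i ((pvRowF grid C i).getD 0 0) = "<"
      · rw [if_pos ⟨hh.1, hh.2, hc⟩, if_pos hc]
      · rw [if_neg (fun hx => hc hx.2.2), if_neg hc]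
    · by_cases hc : cellAt grid i (((pvRowF grid C i).getLast?).getD 0) ∈ (["^", "v", "<"] : List String)
      · rw [if_neg (fun hx => hx.2.2 hc), if_neg (fun hx => hx hc)]
      · rw [if_pos ⟨hl.1, hl.2, hc⟩, if_pos hc]

theorem pvColSum (grid : List (List String)) (R j : Nat) :
    ((List.range R).map (fun i => pvColPart grid R i j)).sum = pvColTot grid R j := by
  unfold pvColTot
  have hsplit : ∀ i, pvColPart grid R i j =
      (if i = (pvColF grid R j).getD 0 0 ∧ (cellAt grid i j ≠ "." ∧ cellAt grid i j = "^")
        then (1 : Int) else 0)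
      + (if i = ((pvColF grid R j).getLast?).getD 0 ∧
            (cellAt grid i j ≠ "." ∧ cellAt grid i j = "v")
        then (1 : Int) else 0) := by
    intro i
    unfold pvColPart
    by_cases h1 : cellAt grid i j = "."
    · simp [h1]
    · by_cases h2 : cellAt grid i j = "^"
      · simp [h1, h2, eq_comm]
      · by_cases h3 : cellAt grid i j = "v"
        · simp [h1, h2, h3, eq_comm]
        · simp [h1, h2, h3]
  simp only [hsplit]
  rw [PySem.List.sum_map_add_int, pvSumIte, pvSumIte]
  by_cases hF : (pvColF grid R j).length = 0
  · have hnil : pvColF grid R j = [] := List.length_eq_zero_iff.mp hF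
    have h1 : ¬ ((pvColF grid R j).getD 0 0 < R ∧
        (cellAt grid ((pvColF grid R j).getD 0 0) j ≠ "." ∧
          cellAt grid ((pvColF grid R j).getD 0 0) j = "^")) := by
      rintro ⟨ha, hb, _⟩
      have : (pvColF grid R j).getD 0 0 ∈ pvColF grid R j := (pvMemColF grid R j _).mpr ⟨ha, hb⟩
      rw [hnil] at this; exact absurd this (List.not_mem_nil)
    have h2 : ¬ (((pvColF grid R j).getLast?).getD 0 < R ∧
        (cellAt grid (((pvColF grid R j).getLast?).getD 0) j ≠ "." ∧
          cellAt grid (((pvColF grid R j).getLast?).getD 0) j = "v")) := by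
      rintro ⟨ha, hb, _⟩
      have : ((pvColF grid R j).getLast?).getD 0 ∈ pvColF grid R j := (pvMemColF grid R j _).mpr ⟨ha, hb⟩
      rw [hnil] at this; exact absurd this (List.not_mem_nil)
    rw [if_neg h1, if_neg h2, if_neg (fun hc => hc hF)]
    rfl
  · have hne : pvColF grid R j ≠ [] := fun hc => hF (by rw [hc]; rfl)
    have hh := (pvMemColF grid R j _).mp (pvHeadMem _ hne)
    have hl := (pvMemColF grid R j _).mp (pvLastMem _ hne)
    rw [if_pos hF]
    congr 1
    · by_cases hc : cellAt grid ((pvColF grid R j).getD 0 0) j = "^"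
      · rw [if_pos ⟨hh.1, hh.2, hc⟩, if_pos hc]
      · rw [if_neg (fun hx => hc hx.2.2), if_neg hc]
    · by_cases hc : cellAt grid (((pvColF grid R j).getLast?).getD 0) j = "v"
      · rw [if_pos ⟨hl.1, hl.2, hc⟩, if_pos hc]
      · rw [if_neg (fun hx => hc hx.2.2), if_neg hc]

theorem pvTotalEq (grid : List (List String)) (R C : Nat) :
    ((List.range R).map (fun i => ((List.range C).map (fun j => pvContrib grid R C i j)).sum)).sum
      = ((List.range R).map (fun i => pvRowTot grid C i)).sum
        + ((List.range C).map (fun j => pvColTot grid R j)).sum := by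
  have h1 : ∀ i, ((List.range C).map (fun j => pvContrib grid R C i j)).sum
      = ((List.range C).map (fun j => pvRowPart grid C i j)).sum
        + ((List.range C).map (fun j => pvColPart grid R i j)).sum := by
    intro i
    rw [← PySem.List.sum_map_add_int]
    exact congrArg List.sum (List.map_congr_left (fun j _ => pvContrib_split grid R C i j))
  simp only [h1]
  rw [PySem.List.sum_map_add_int]
  congr 1
  · exact congrArg List.sum (List.map_congr_left (fun i _ => pvRowSum grid C i))
  · rw [pvSumComm]
    exact congrArg List.sum (List.map_congr_left (fun j _ => pvColSum grid R j))


theorem pvLineRow (grid : List (List String)) (C i : Nat) :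
    altLineInfo (fun j => cellAt grid i j) C =
      ((pvRowF grid C i).head?, (pvRowF grid C i).getLast?, (pvRowF grid C i).length) := by
  rw [pvLineInfo]; rfl

theorem pvLineCol (grid : List (List String)) (R j : Nat) :
    altLineInfo (fun i => cellAt grid i j) R =
      ((pvColF grid R j).head?, (pvColF grid R j).getLast?, (pvColF grid R j).length) := by
  rw [pvLineInfo]; rfl

theorem pvCondRow (grid : List (List String)) (R C i : Nat) (hi : i < R) :
    ((List.range C).any (fun j => decide (pvBad grid R C i j)))
    = decide ((((List.range R).map (fun i => altLineInfo (fun j => cellAt grid i j) C)).getD i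
          ((none : Option Nat), (none : Option Nat), 0)).2.2 = 1 ∧
        (((List.range C).map (fun j => altLineInfo (fun i => cellAt grid i j) R)).getD
          ((((List.range R).map (fun i => altLineInfo (fun j => cellAt grid i j) C)).getD i
            ((none : Option Nat), (none : Option Nat), 0)).1.getD 0)
          ((none : Option Nat), (none : Option Nat), 0)).2.2 = 1) := by
  rw [PySem.List.getD_map_range _ _ _ _ hi, pvLineRow]
  rw [Bool.eq_iff_iff]
  simp only [List.any_eq_true, decide_eq_true_eq, List.mem_range]
  constructor
  · rintro ⟨j, hj, hnd, hr, hc⟩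
    have hjF : j ∈ pvRowF grid C i := (pvMemRowF grid C i j).mpr ⟨hj, hnd⟩
    rcases List.length_eq_one_iff.mp hr with ⟨a, ha⟩
    rw [ha] at hjF
    have hja : j = a := by simpa using hjF
    refine ⟨hr, ?_⟩
    have hhead : ((pvRowF grid C i).head?).getD 0 = j := by rw [ha, hja]; rfl
    rw [hhead, PySem.List.getD_map_range _ _ _ _ hj, pvLineCol]
    exact hc
  · rintro ⟨hr, hc⟩
    have hne : pvRowF grid C i ≠ [] := by
      intro h; rw [h] at hr; simp at hr
    have hmem := (pvMemRowF grid C i _).mp (pvHeadMem _ hne)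
    rw [pvHeadD, PySem.List.getD_map_range _ _ _ _ hmem.1, pvLineCol] at hc
    exact ⟨(pvRowF grid C i).getD 0 0, hmem.1, hmem.2, hr, hc⟩

theorem pvMatchIf (c : Prop) [Decidable c] (x : Int) :
    (match (if c then (none : Option Int) else some x) with
      | none => "IMPOSSIBLE"
      | some r => PySem.Int.toStr r) = if c then "IMPOSSIBLE" else PySem.Int.toStr x := by
  split_ifs <;> rfl

set_option maxHeartbeats 1000000 in
theorem solve_spec' (grid : List (List String)) : solve grid = solve_alt grid := by
  simp only [solve, solve_alt]
  rw [pvCountEq grid grid.length (grid.getD 0 []).length _ _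
    (fun i hi => pvBuildRows grid _ _ i hi) (fun j hj => pvBuildCols grid _ _ j hj)]
  set R := grid.length with hR
  set C := (grid.getD 0 []).length with hC
  rw [PySem.List.any_congr_mem (fun i hi => pvCondRow grid R C i (List.mem_range.mp hi))]
  rw [pvMatchIf]
  rw [PySem.List.foldl_congr_mem (List.range R) _ (fun acc i => acc + pvRowTot grid C i) _ (by
    intro acc i hi
    have hi' := List.mem_range.mp hi
    dsimp only
    rw [PySem.List.getD_map_range _ _ _ _ hi', pvLineRow]
    dsimp only
    rw [pvHeadD]
    unfold pvRowTot
    split_ifs <;> ring)]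
  rw [PySem.List.foldl_congr_mem (List.range C) _ (fun acc j => acc + pvColTot grid R j) _ (by
    intro acc j hj
    have hj' := List.mem_range.mp hj
    dsimp only
    rw [PySem.List.getD_map_range _ _ _ _ hj', pvLineCol]
    dsimp only
    rw [pvHeadD]
    unfold pvColTot
    split_ifs <;> ring)]
  rw [PySem.List.foldl_add, PySem.List.foldl_add]
  refine if_congr Iff.rfl rfl ?_
  exact congrArg PySem.Int.toStr (by rw [pvTotalEq grid R C]; ring)

-- ===== VERDICT (by name: the statement is the Claim_ definition above) =====
theorem solve_spec : Claim_equal_solve := by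
  intro grid _ _
  exact solve_spec' grid
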